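-- pv_equiv track=rewrite | github.com/EquilibriaW/Multi-agent-bench | scripts/dspy_role_driver.py | _interaction_graph
-- ===== SOURCE A (Python) =====
-- def _interaction_graph(packets: dict[str, dict]) -> list[tuple[str, str]]:
--     """Deterministic: edges only where files overlap."""
--     edges = []
--     coders = list(packets.keys())
--     for i, a in enumerate(coders):
--         files_a = set(packets[a].get("files_changed", []))
--         for b in coders[i + 1:]:
--             files_b = set(packets[b].get("files_changed", []))
--             if files_a & files_b:
--                 edges.append((a, b))
--     return edges
-- ===== SOURCE B (Python) =====
-- def _interaction_graph(packets: dict[str, dict]) -> list[tuple[str, str]]: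
--     """Inverted index file -> coder positions; pair set; emit edges in index order."""
--     coders = list(packets.keys())
--     index: dict[str, list[int]] = {}
--     for i, a in enumerate(coders):
--         for f in dict.fromkeys(packets[a].get("files_changed", [])):
--             index.setdefault(f, []).append(i)
--     pairs = set()
--     for idxs in index.values():
--         for x, i in enumerate(idxs):
--             for j in idxs[x + 1:]:
--                 pairs.add((i, j))
--     n = len(coders)
--     return [(coders[i], coders[j])
--             for i in range(n) for j in range(i + 1, n) if (i, j) in pairs]
-- ===== Notes on version B (the rewrite author's own statement) =====
-- stated objective: faster
-- what changed: Replaces A's all-pairs loop that builds and intersects the two coders' file sets for every pair by an inverted index file -> coder positions, from which a set of co-occurring position pairs is collected once; edges are then emitted by index order with an O(1) pair-set membership test.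
import Mathlib
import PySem

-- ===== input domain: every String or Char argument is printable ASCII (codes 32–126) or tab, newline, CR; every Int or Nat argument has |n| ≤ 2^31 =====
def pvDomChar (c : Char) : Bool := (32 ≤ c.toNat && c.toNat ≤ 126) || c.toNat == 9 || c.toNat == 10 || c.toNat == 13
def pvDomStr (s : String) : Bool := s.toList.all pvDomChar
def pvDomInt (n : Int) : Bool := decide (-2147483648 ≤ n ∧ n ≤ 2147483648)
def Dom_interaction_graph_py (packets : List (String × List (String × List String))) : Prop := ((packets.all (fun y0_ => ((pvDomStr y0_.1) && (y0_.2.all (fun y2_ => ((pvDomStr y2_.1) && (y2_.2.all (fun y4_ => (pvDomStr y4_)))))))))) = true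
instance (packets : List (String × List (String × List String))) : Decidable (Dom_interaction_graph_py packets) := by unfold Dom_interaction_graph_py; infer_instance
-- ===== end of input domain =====

-- B replaces A's all-pairs file-set intersections by an inverted index file -> coder
-- positions and a set of co-occurring position pairs (objective: faster).

-- shared helper: packets[a].get("files_changed", []) (both Pythons contain this expression)
def igFiles (d : PySem.Dict String (List (String × List String))) (a : String) : List String :=
  (PySem.Dict.ofList (d.getD a [])).getD "files_changed" []

-- ===== PORT A =====
def interaction_graph_py (packets : List (String × List (String × List String))) : List (String × String) :=
  let d := PySem.Dict.ofList packets
  let coders := PySem.Dict.keys d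
  (PySem.List.enumerate coders).foldl (fun edges ia =>
    let filesA := PySem.Set.ofList (igFiles d ia.2)
    (PySem.List.slice coders (some (ia.1 + 1)) none).foldl (fun edges b =>
      let filesB := PySem.Set.ofList (igFiles d b)
      if PySem.Set.inter filesA filesB ≠ [] then edges ++ [(ia.2, b)] else edges) edges) []

-- ===== PORT B =====
-- index: for i, a in enumerate(coders): for f in dict.fromkeys(...): index.setdefault(f, []).append(i)
def igIndex (d : PySem.Dict String (List (String × List String))) (coders : List String) :
    PySem.Dict String (List Int) :=
  (PySem.List.enumerate coders).foldl (fun idx ia =>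
    (PySem.List.dedup (igFiles d ia.2)).foldl (fun idx f =>
      idx.modify f [] (· ++ [ia.1])) idx) PySem.Dict.empty

-- pairs: for idxs in index.values(): for x, i in enumerate(idxs): for j in idxs[x+1:]: pairs.add((i, j))
def igPairs (index : PySem.Dict String (List Int)) : PySem.Set (Int × Int) :=
  (PySem.Dict.values index).foldl (fun ps idxs =>
    (PySem.List.enumerate idxs).foldl (fun ps xi =>
      (PySem.List.slice idxs (some (xi.1 + 1)) none).foldl (fun ps j =>
        ps.add (xi.2, j)) ps) ps) PySem.Set.empty

def interaction_graph_py_alt (packets : List (String × List (String × List String))) : List (String × String) :=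
  let d := PySem.Dict.ofList packets
  let coders := PySem.Dict.keys d
  let pairs := igPairs (igIndex d coders)
  let n : Int := PySem.List.len coders
  (PySem.List.pyRange 0 n).flatMap (fun i =>
    ((PySem.List.pyRange (i + 1) n).filter (fun j => pairs.contains (i, j))).map
      (fun j => (PySem.List.pyGetD coders i "", PySem.List.pyGetD coders j "")))

-- ===== PRECONDITION & SPEC =====
def Spec_interaction_graph_py (packets : List (String × List (String × List String))) (out : List (String × String)) : Prop := out = interaction_graph_py_alt packets
instance (packets : List (String × List (String × List String))) (out : List (String × String)) : Decidable (Spec_interaction_graph_py packets out) := by unfold Spec_interaction_graph_py; infer_instance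

-- ===== CLAIM (what is proved, stated in full; the proofs are below) =====
def Claim_equal_interaction_graph_py : Prop := ∀ (packets : List (String × List (String × List String))), Dom_interaction_graph_py packets → Spec_interaction_graph_py packets (interaction_graph_py packets)

-- ===== LEMMAS AND PROOFS =====

-- generic membership law for a fold that only accumulates elements
theorem pv_mem_foldl_iff {α β : Type} (step : List α → β → List α) (C : β → α → Prop)
    (h : ∀ ps x q, q ∈ step ps x ↔ q ∈ ps ∨ C x q) (l : List β) (ps : List α) (q : α) :
    q ∈ l.foldl step ps ↔ q ∈ ps ∨ ∃ x ∈ l, C x q := by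
  induction l generalizing ps with
  | nil => simp
  | cons x t ih => simp [List.foldl_cons, ih, h]; tauto

-- one coder's inner loop of the index build
theorem pv_getD_inner (i : Int) (fs : List String) (idx : PySem.Dict String (List Int)) (f : String) :
    ((PySem.List.dedup fs).foldl (fun idx g => idx.modify g [] (· ++ [i])) idx).getD f []
      = idx.getD f [] ++ (if f ∈ fs then [i] else []) := by
  rw [show ((PySem.List.dedup fs).foldl (fun idx g => idx.modify g [] (· ++ [i])) idx)
        = (((PySem.List.dedup fs).map (fun g => (g, i))).foldl
            (fun idx p => idx.modify p.1 [] (· ++ [p.2])) idx) from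
        (List.foldl_map (f := fun g => (g, i))
          (g := fun idx p => idx.modify p.1 [] (· ++ [p.2]))
          (l := PySem.List.dedup fs) (init := idx)).symm,
      PySem.Dict.getD_foldl_modify_append]
  have hfil : ((PySem.List.dedup fs).map (fun g => (g, i))).filter (fun p => p.1 == f)
      = ((PySem.List.dedup fs).filter (fun g => g == f)).map (fun g => (g, i)) := by
    rw [List.filter_map]; rfl
  have hded : (PySem.List.dedup fs).filter (fun g => g == f) = if f ∈ fs then [f] else [] := by
    rw [List.filter_beq]
    by_cases h : f ∈ fs
    · rw [List.count_eq_one_of_mem (PySem.List.nodup_dedup fs) ((PySem.List.mem_dedup fs f).mpr h)]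
      simp [h]
    · rw [List.count_eq_zero_of_not_mem (fun hc => h ((PySem.List.mem_dedup fs f).mp hc))]
      simp [h]
  rw [hfil, hded]
  by_cases h : f ∈ fs <;> simp [h]

theorem pv_getD_igIndex (d : PySem.Dict String (List (String × List String))) (coders : List String) (f : String) :
    (igIndex d coders).getD f []
      = ((PySem.List.enumerate coders).filter (fun ia => decide (f ∈ igFiles d ia.2))).map (·.1) := by
  have aux : ∀ (l : List (Int × String)) (idx : PySem.Dict String (List Int)),
      (l.foldl (fun idx ia => (PySem.List.dedup (igFiles d ia.2)).foldl
          (fun idx g => idx.modify g [] (· ++ [ia.1])) idx) idx).getD f []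
        = idx.getD f [] ++ (l.filter (fun ia => decide (f ∈ igFiles d ia.2))).map (·.1) := by
    intro l
    induction l with
    | nil => intro idx; simp
    | cons ia t ih =>
      intro idx
      rw [List.foldl_cons, ih, pv_getD_inner]
      by_cases h : f ∈ igFiles d ia.2 <;> simp [h]
  rw [igIndex, aux, PySem.Dict.getD_empty, List.nil_append]

theorem pv_keys_igIndex (d : PySem.Dict String (List (String × List String))) (coders : List String) :
    (igIndex d coders).keys
      = PySem.Set.ofList ((PySem.List.enumerate coders).flatMap (fun ia => PySem.List.dedup (igFiles d ia.2))) := by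
  have aux : ∀ (l : List (Int × String)) (idx : PySem.Dict String (List Int)),
      (l.foldl (fun idx ia => (PySem.List.dedup (igFiles d ia.2)).foldl
          (fun idx g => idx.modify g [] (· ++ [ia.1])) idx) idx).keys
        = PySem.Set.update idx.keys (l.flatMap (fun ia => PySem.List.dedup (igFiles d ia.2))) := by
    intro l
    induction l with
    | nil => intro idx; simp [PySem.Set.update]
    | cons ia t ih =>
      intro idx
      rw [List.foldl_cons, ih, PySem.Dict.keys_foldl_modify (f := fun _ _ => (· ++ [ia.1]))]
      simp [PySem.Set.update, List.flatMap_cons, List.foldl_append]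
  rw [igIndex, aux, PySem.Dict.keys_empty, PySem.Set.update_nil_left]

theorem pv_nodup_keys_igIndex (d : PySem.Dict String (List (String × List String))) (coders : List String) :
    (igIndex d coders).keys.Nodup := by
  rw [pv_keys_igIndex]; exact PySem.Set.nodup_ofList _

theorem pv_mem_igPairs (index : PySem.Dict String (List Int)) (q : Int × Int) :
    q ∈ igPairs index ↔ ∃ idxs ∈ PySem.Dict.values index, ∃ xi ∈ PySem.List.enumerate idxs,
      ∃ j ∈ PySem.List.slice idxs (some (xi.1 + 1)) none, q = (xi.2, j) := by
  have h1 : ∀ (idxs : List Int) (ps : PySem.Set (Int × Int)) (q : Int × Int),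
      q ∈ (PySem.List.enumerate idxs).foldl (fun ps xi =>
          (PySem.List.slice idxs (some (xi.1 + 1)) none).foldl (fun ps j => ps.add (xi.2, j)) ps) ps
        ↔ q ∈ ps ∨ ∃ xi ∈ PySem.List.enumerate idxs,
            ∃ j ∈ PySem.List.slice idxs (some (xi.1 + 1)) none, q = (xi.2, j) := by
    intro idxs ps q
    exact pv_mem_foldl_iff
      (step := fun (ps : PySem.Set (Int × Int)) (xi : Int × Int) =>
        (PySem.List.slice idxs (some (xi.1 + 1)) none).foldl
          (fun ps j => PySem.Set.add ps (xi.2, j)) ps)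
      (C := fun (xi : Int × Int) (q : Int × Int) =>
        ∃ j ∈ PySem.List.slice idxs (some (xi.1 + 1)) none, q = (xi.2, j))
      (fun ps xi q => PySem.Set.mem_foldl_add _ (fun j => (xi.2, j)) _ _) _ _ _
  rw [igPairs, pv_mem_foldl_iff
      (step := fun (ps : PySem.Set (Int × Int)) (idxs : List Int) =>
        (PySem.List.enumerate idxs).foldl (fun ps xi =>
          (PySem.List.slice idxs (some (xi.1 + 1)) none).foldl
            (fun ps j => PySem.Set.add ps (xi.2, j)) ps) ps)
      (C := fun (idxs : List Int) (q : Int × Int) => ∃ xi ∈ PySem.List.enumerate idxs,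
        ∃ j ∈ PySem.List.slice idxs (some (xi.1 + 1)) none, q = (xi.2, j))
      (fun ps idxs q => h1 idxs ps q)]
  simp [PySem.Set.empty]

-- in a strictly increasing list, the emitted pairs are exactly the ordered pairs of members
theorem pv_pairs_of_incr (idxs : List Int) (h : idxs.Pairwise (· < ·)) (i j : Int) :
    (∃ xi ∈ PySem.List.enumerate idxs, ∃ m ∈ PySem.List.slice idxs (some (xi.1 + 1)) none,
        (i, j) = (xi.2, m))
      ↔ i ∈ idxs ∧ j ∈ idxs ∧ i < j := by
  have hpw := List.pairwise_iff_getElem.mp h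
  constructor
  · rintro ⟨xi, hxi, m, hm, heq⟩
    obtain ⟨k, hk, rfl⟩ := (PySem.List.mem_enumerate_iff idxs 0 xi).mp hxi
    rw [Prod.mk.injEq] at heq
    obtain ⟨hi1, hj1⟩ := heq
    rw [show (0 + (k : Int)) + 1 = ((k + 1 : Nat) : Int) by push_cast; ring,
        PySem.List.slice_from_natCast] at hm
    obtain ⟨t, ht, hmt⟩ := List.mem_iff_getElem.mp hm
    rw [List.getElem_drop] at hmt
    have hlt : k + 1 + t < idxs.length := by
      have := ht; rw [List.length_drop] at this; omega
    subst hi1 hj1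
    rw [← hmt]
    exact ⟨List.getElem_mem hk, List.getElem_mem hlt, hpw k (k + 1 + t) hk hlt (by omega)⟩
  · rintro ⟨hi, hj, hij⟩
    obtain ⟨k, hk, hki⟩ := List.mem_iff_getElem.mp hi
    obtain ⟨m, hm, hmj⟩ := List.mem_iff_getElem.mp hj
    have hkm : k < m := by
      rcases lt_trichotomy k m with h1 | h1 | h1
      · exact h1
      · exfalso; subst h1; rw [hki] at hmj; omega
      · exfalso; have := hpw m k hm hk h1; rw [hki, hmj] at this; omega
    refine ⟨((0 : Int) + (k : Int), idxs[k]), (PySem.List.mem_enumerate_iff idxs 0 _).mpr ⟨k, hk, rfl⟩, j, ?_, by rw [hki]⟩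
    rw [show ((0 : Int) + (k : Int), idxs[k]).1 + 1 = ((k + 1 : Nat) : Int) by push_cast; ring,
        PySem.List.slice_from_natCast]
    have hlen : m - (k + 1) < (idxs.drop (k + 1)).length := by rw [List.length_drop]; omega
    have : (idxs.drop (k + 1))[m - (k + 1)] = j := by
      rw [List.getElem_drop, ← hmj]; congr 1; omega
    rw [← this]
    exact List.getElem_mem hlen

theorem pv_occ_pairwise (d : PySem.Dict String (List (String × List String))) (coders : List String) (f : String) :
    ((((PySem.List.enumerate coders).filter (fun ia => decide (f ∈ igFiles d ia.2)))).map (·.1)).Pairwise (· < ·) := by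
  exact ((PySem.List.pairwise_lt_enumerate coders 0).filter _).map _ (fun a b hab => hab)

theorem pv_mem_occ (d : PySem.Dict String (List (String × List String))) (coders : List String) (f : String) (i : Int) :
    i ∈ (((PySem.List.enumerate coders).filter (fun ia => decide (f ∈ igFiles d ia.2)))).map (·.1)
      ↔ ∃ k : Nat, k < coders.length ∧ i = (k : Int) ∧ f ∈ igFiles d (coders.getD k "") := by
  simp only [List.mem_map, List.mem_filter, PySem.List.mem_enumerate_iff]
  constructor
  · rintro ⟨ia, ⟨⟨k, hk, rfl⟩, hdec⟩, h1⟩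
    simp only [decide_eq_true_eq] at hdec
    refine ⟨k, hk, by simpa using h1.symm, ?_⟩
    rwa [List.getD_eq_getElem _ _ hk]
  · rintro ⟨k, hk, rfl, hf⟩
    refine ⟨((0 : Int) + (k : Int), coders[k]), ⟨⟨k, hk, rfl⟩, ?_⟩, by simp⟩
    simp only [decide_eq_true_eq]
    rwa [List.getD_eq_getElem _ _ hk] at hf

-- the pair set is exactly the ordered index pairs of coders sharing a file
theorem pv_mem_pairs_iff (d : PySem.Dict String (List (String × List String))) (coders : List String) (i j : Int) :
    (i, j) ∈ igPairs (igIndex d coders)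
      ↔ ∃ ki kj : Nat, ki < coders.length ∧ kj < coders.length ∧ i = (ki : Int) ∧ j = (kj : Int) ∧ i < j ∧
          ∃ f, f ∈ igFiles d (coders.getD ki "") ∧ f ∈ igFiles d (coders.getD kj "") := by
  rw [pv_mem_igPairs]
  have hnd := pv_nodup_keys_igIndex d coders
  constructor
  · rintro ⟨idxs, hvals, hrest⟩
    rw [PySem.Dict.values_eq_map_keys _ hnd []] at hvals
    obtain ⟨key, _hkey, rfl⟩ := List.mem_map.mp hvals
    rw [pv_getD_igIndex] at hrest
    obtain ⟨hi, hj, hij⟩ := (pv_pairs_of_incr _ (pv_occ_pairwise d coders key) i j).mp hrest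
    rw [pv_mem_occ] at hi hj
    obtain ⟨ki, hki, rfl, hfi⟩ := hi
    obtain ⟨kj, hkj, rfl, hfj⟩ := hj
    exact ⟨ki, kj, hki, hkj, rfl, rfl, hij, key, hfi, hfj⟩
  · rintro ⟨ki, kj, hki, hkj, rfl, rfl, hij, f, hfi, hfj⟩
    refine ⟨(igIndex d coders).getD f [], ?_, ?_⟩
    · rw [PySem.Dict.values_eq_map_keys _ hnd []]
      refine List.mem_map.mpr ⟨f, ?_, rfl⟩
      rw [pv_keys_igIndex, PySem.Set.mem_ofList]
      refine List.mem_flatMap.mpr ⟨((0 : Int) + (ki : Int), coders[ki]'hki),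
        (PySem.List.mem_enumerate_iff coders 0 _).mpr ⟨ki, hki, rfl⟩, ?_⟩
      rw [PySem.List.mem_dedup]
      rwa [List.getD_eq_getElem _ _ hki] at hfi
    · rw [pv_getD_igIndex]
      exact (pv_pairs_of_incr _ (pv_occ_pairwise d coders f) _ _).mpr
        ⟨(pv_mem_occ d coders f _).mpr ⟨ki, hki, rfl, hfi⟩,
         (pv_mem_occ d coders f _).mpr ⟨kj, hkj, rfl, hfj⟩, hij⟩

theorem pv_inter_ne_nil_iff (A B : List String) :
    PySem.Set.inter (PySem.Set.ofList A) (PySem.Set.ofList B) ≠ [] ↔ ∃ f, f ∈ A ∧ f ∈ B := by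
  constructor
  · intro h
    obtain ⟨f, hf⟩ := List.exists_mem_of_ne_nil _ h
    rw [PySem.Set.mem_inter, PySem.Set.mem_ofList, PySem.Set.mem_ofList] at hf
    exact ⟨f, hf⟩
  · rintro ⟨f, hA, hB⟩ hnil
    have : f ∈ PySem.Set.inter (PySem.Set.ofList A) (PySem.Set.ofList B) :=
      (PySem.Set.mem_inter _ _ _).mpr ⟨(PySem.Set.mem_ofList _ _).mpr hA, (PySem.Set.mem_ofList _ _).mpr hB⟩
    rw [hnil] at this
    simp at this

theorem pv_drop_eq_map_pyRange {α : Type} (xs : List α) (dflt : α) (k : Nat) :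
    xs.drop k = (PySem.List.pyRange k (PySem.List.len xs)).map (fun j => PySem.List.pyGetD xs j dflt) := by
  by_cases h : k < xs.length
  · rw [PySem.List.pyRange_one_cons (by simp only [PySem.List.len]; exact_mod_cast h),
        List.map_cons, List.drop_eq_getElem_cons h]
    congr 1
    · rw [PySem.List.pyGetD_natCast, List.getD_eq_getElem _ _ h]
    · rw [show (k : Int) + 1 = ((k + 1 : Nat) : Int) by push_cast; ring]
      exact pv_drop_eq_map_pyRange xs dflt (k + 1)
  · have h1 : PySem.List.pyRange (k : Int) (PySem.List.len xs) = [] := by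
      rw [List.eq_nil_iff_forall_not_mem]
      intro x hx
      rw [PySem.List.mem_pyRange_one] at hx
      simp only [PySem.List.len] at hx
      omega
    rw [h1, List.map_nil, List.drop_eq_nil_of_le (by omega)]
  termination_by xs.length - k

-- the two loop bodies agree for any dict and key list
theorem pv_main (d : PySem.Dict String (List (String × List String))) (coders : List String) :
    ((PySem.List.enumerate coders).foldl (fun edges ia =>
      let filesA := PySem.Set.ofList (igFiles d ia.2)
      (PySem.List.slice coders (some (ia.1 + 1)) none).foldl (fun edges b =>
        let filesB := PySem.Set.ofList (igFiles d b)
        if PySem.Set.inter filesA filesB ≠ [] then edges ++ [(ia.2, b)] else edges) edges) [])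
    = (PySem.List.pyRange 0 (PySem.List.len coders)).flatMap (fun i =>
        ((PySem.List.pyRange (i + 1) (PySem.List.len coders)).filter
            (fun j => (igPairs (igIndex d coders)).contains (i, j))).map
          (fun j => (PySem.List.pyGetD coders i "", PySem.List.pyGetD coders j ""))) := by
  simp only [PySem.List.foldl_append_ite, PySem.List.foldl_append_eq_flatMap, List.nil_append]
  rw [PySem.List.enumerate_eq_map_pyRange coders "", List.flatMap_map]
  rw [List.flatMap_def, List.flatMap_def]
  apply congrArg List.flatten
  apply List.map_congr_left
  intro i hi
  rw [PySem.List.mem_pyRange_one] at hi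
  have hk0 : 0 ≤ i := hi.1
  have hik : i = (i.toNat : Int) := (Int.toNat_of_nonneg hk0).symm
  have hkl : i.toNat < coders.length := by
    simp only [PySem.List.len] at hi; omega
  rw [hik]
  rw [show ((i.toNat : Int) + 1) = ((i.toNat + 1 : Nat) : Int) by push_cast; ring]
  rw [PySem.List.slice_from_natCast, pv_drop_eq_map_pyRange coders "" (i.toNat + 1)]
  rw [List.filter_map, List.map_map]
  apply congrArg
  apply List.filter_congr
  intro j hj
  rw [PySem.List.mem_pyRange_one] at hj
  have hj0 : 0 ≤ j := by omega
  have hjm : j = (j.toNat : Int) := (Int.toNat_of_nonneg hj0).symm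
  have hml : j.toNat < coders.length := by
    simp only [PySem.List.len] at hj; omega
  have hkm : i.toNat < j.toNat := by omega
  rw [PySem.Set.contains_eq_decide]
  apply decide_eq_decide.mpr
  rw [hjm]
  simp only [PySem.List.pyGetD_natCast]
  rw [pv_inter_ne_nil_iff, pv_mem_pairs_iff]
  constructor
  · rintro ⟨f, hfa, hfb⟩
    exact ⟨i.toNat, j.toNat, hkl, hml, rfl, rfl, by exact_mod_cast hkm, f, hfa, hfb⟩
  · rintro ⟨ki, kj, _hki, _hkj, hik2, hjm2, _hij, f, hfa, hfb⟩
    have e1 : ki = i.toNat := by omega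
    have e2 : kj = j.toNat := by omega
    subst e1 e2
    exact ⟨f, hfa, hfb⟩

-- ===== VERDICT (by name: the statement is the Claim_ definition above) =====
theorem interaction_graph_py_spec : Claim_equal_interaction_graph_py := by
  intro packets _
  show interaction_graph_py packets = interaction_graph_py_alt packets
  unfold interaction_graph_py interaction_graph_py_alt
  exact pv_main (PySem.Dict.ofList packets) ((PySem.Dict.ofList packets).keys)
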